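-- pv_equiv track=rewrite | github.com/Hari-krishna-reddy/Top-100-codes-for-beginners-in-python | 59.find f(n).py | F
-- ===== SOURCE A (Python) =====
-- def F(n):
--     s=0
--     k=1
--     for i in range(1,n+1):
--         f=1
--         for j in range(i):
--             f*=k
--             k+=1
--         s+=f
--     return s
-- ===== SOURCE B (Python) =====
-- def F(n):
--     def prod_range(lo, hi):
--         if hi - lo <= 1:
--             return lo
--         mid = (lo + hi) // 2
--         return prod_range(lo, mid) * prod_range(mid, hi)
--     s = 0
--     for i in range(1, n + 1):
--         start = i * (i - 1) // 2 + 1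
--         s += prod_range(start, start + i)
--     return s
-- ===== Notes on version B (the rewrite author's own statement) =====
-- stated objective: alternative
-- what changed: Drops A's counter threaded through nested loops: each block's start comes from the closed-form triangular index and the block product is computed by a recursive balanced divide-and-conquer product tree instead of a sequential multiply-accumulate loop.
import Mathlib
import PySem

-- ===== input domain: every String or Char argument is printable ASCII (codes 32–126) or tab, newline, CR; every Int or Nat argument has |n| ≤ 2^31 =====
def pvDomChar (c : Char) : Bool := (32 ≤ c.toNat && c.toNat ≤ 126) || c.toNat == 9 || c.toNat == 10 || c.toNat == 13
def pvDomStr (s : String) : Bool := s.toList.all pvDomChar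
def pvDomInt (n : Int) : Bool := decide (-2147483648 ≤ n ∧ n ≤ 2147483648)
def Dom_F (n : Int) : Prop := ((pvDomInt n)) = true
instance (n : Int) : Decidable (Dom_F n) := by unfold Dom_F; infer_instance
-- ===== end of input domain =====

-- B drops A's threaded counter: each block starts at the closed-form triangular index and its
-- product is computed by a recursive balanced (divide-and-conquer) product tree, not a sequential loop.

-- ===== PORT A =====
-- outer state (s, k); inner state (f, k), as in the Python
def F (n : Int) : Int :=
  ((PySem.List.pyRange 1 (n + 1) 1).foldl
    (fun (sk : Int × Int) i =>
      let fk := (PySem.List.pyRange 0 i 1).foldl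
        (fun (fk : Int × Int) _ => (fk.1 * fk.2, fk.2 + 1)) (1, sk.2)
      (sk.1 + fk.1, fk.2))
    (0, 1)).1

-- ===== PORT B =====
-- prod_range(lo, hi): balanced product of lo..hi-1 by splitting at the midpoint, as in Source B
def prodRange (lo hi : Int) : Int :=
  if hi - lo ≤ 1 then lo
  else
    prodRange lo (PySem.Int.floordiv (lo + hi) 2)
      * prodRange (PySem.Int.floordiv (lo + hi) 2) hi
termination_by (hi - lo).toNat
decreasing_by
  all_goals
    simp only [PySem.Int.floordiv]
    rw [Int.fdiv_eq_ediv]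
    simp only [not_le] at *
    omega

def F_alt (n : Int) : Int :=
  (PySem.List.pyRange 1 (n + 1) 1).foldl
    (fun s i =>
      let start := PySem.Int.floordiv (i * (i - 1)) 2 + 1
      s + prodRange start (start + i))
    0

-- ===== PRECONDITION & SPEC =====
def Spec_F (n : Int) (out : Int) : Prop := out = F_alt n
instance (n : Int) (out : Int) : Decidable (Spec_F n out) := by unfold Spec_F; infer_instance

-- ===== CLAIM (what is proved, stated in full; the proofs are below) =====
def Claim_equal_F : Prop := ∀ (n : Int), Dom_F n → Spec_F n (F n)

-- ===== LEMMAS AND PROOFS =====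

-- tri m = m-th triangular number; pprod a l = a*(a+1)*...*(a+l-1); S m = A's sum after m blocks
def tri : Nat → Nat
  | 0 => 0
  | m + 1 => tri m + (m + 1)

def pprod (a : Int) : Nat → Int
  | 0 => 1
  | l + 1 => pprod a l * (a + l)

def S : Nat → Int
  | 0 => 0
  | m + 1 => S m + pprod ((tri m : Int) + 1) (m + 1)

lemma pprod_append (a : Int) (t l : Nat) :
    pprod a (t + l) = pprod a t * pprod (a + t) l := by
  induction l with
  | zero => simp [pprod]
  | succ l ih =>
    show pprod a (t + l + 1) = _
    rw [pprod, ih, pprod]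
    push_cast
    ring

lemma two_tri (m : Nat) : 2 * tri m = m * (m + 1) := by
  induction m with
  | zero => simp [tri]
  | succ m ih => rw [tri]; ring_nf; ring_nf at ih; omega

-- A's inner loop from (1, k): f becomes the product of k, k+1, …, k+i-1 and the counter advances by i
lemma inner_eq (i : Nat) (f k : Int) :
    (PySem.List.pyRange 0 (i : Int) 1).foldl
      (fun (fk : Int × Int) _ => (fk.1 * fk.2, fk.2 + 1)) (f, k)
    = (f * pprod k i, k + i) := by
  induction i generalizing f k with
  | zero => simp [PySem.List.pyRange_one_eq_nil, pprod]
  | succ m ih =>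
    have h : PySem.List.pyRange 0 ((m : Int) + 1) 1
        = PySem.List.pyRange 0 (m : Int) 1 ++ [(m : Int)] :=
      PySem.List.pyRange_one_succ_right (by omega)
    push_cast
    rw [h, List.foldl_append, ih, List.foldl_cons, List.foldl_nil]
    refine Prod.ext ?_ ?_
    · show f * pprod k m * (k + (m : Int)) = f * pprod k (m + 1)
      rw [pprod]; ring
    · show k + (m : Int) + 1 = k + ((m : Int) + 1)
      ring

-- A's outer loop after m blocks: state is (S m, tri m + 1)
lemma outer_A (m : Nat) :
    (PySem.List.pyRange 1 ((m : Int) + 1) 1).foldl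
      (fun (sk : Int × Int) i =>
        let fk := (PySem.List.pyRange 0 i 1).foldl
          (fun (fk : Int × Int) _ => (fk.1 * fk.2, fk.2 + 1)) (1, sk.2)
        (sk.1 + fk.1, fk.2))
      (0, 1)
    = (S m, (tri m : Int) + 1) := by
  induction m with
  | zero => simp [PySem.List.pyRange_one_eq_nil, S, tri]
  | succ m ih =>
    have h : PySem.List.pyRange 1 ((m : Int) + 1 + 1) 1
        = PySem.List.pyRange 1 ((m : Int) + 1) 1 ++ [(m : Int) + 1] :=
      PySem.List.pyRange_one_succ_right (by omega)
    push_cast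
    push_cast at ih
    rw [h, List.foldl_append, ih, List.foldl_cons, List.foldl_nil]
    have hc : ((m : Int) + 1) = ((m + 1 : Nat) : Int) := by push_cast; ring
    rw [hc, inner_eq]
    simp only [one_mul, S, tri]
    push_cast
    exact Prod.ext rfl (by ring)

-- the balanced product tree computes the same ascending product pprod lo l
lemma prodRange_eq (l : Nat) (lo hi : Int) (hl : hi - lo = (l : Int)) (h1 : 1 ≤ l) :
    prodRange lo hi = pprod lo l := by
  induction l using Nat.strong_induction_on generalizing lo hi with
  | _ l ih =>
    rw [prodRange]
    by_cases hle : hi - lo ≤ 1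
    · have : l = 1 := by omega
      subst this
      rw [if_pos hle]
      simp [pprod]
    · have hmid : PySem.Int.floordiv (lo + hi) 2 = (lo + hi) / 2 := by
        simp only [PySem.Int.floordiv]
        rw [Int.fdiv_eq_ediv]; simp
      rw [if_neg hle, hmid]
      have hb : lo + 1 ≤ (lo + hi) / 2 ∧ (lo + hi) / 2 + 1 ≤ hi := by omega
      have ht : (lo + hi) / 2 - lo = (((lo + hi) / 2 - lo).toNat : Int) := by omega
      have hu : hi - (lo + hi) / 2 = ((hi - (lo + hi) / 2).toNat : Int) := by omega
      have hsum : ((lo + hi) / 2 - lo).toNat + (hi - (lo + hi) / 2).toNat = l := by omega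
      rw [ih ((lo + hi) / 2 - lo).toNat (by omega) lo ((lo + hi) / 2) ht (by omega),
          ih (hi - (lo + hi) / 2).toNat (by omega) ((lo + hi) / 2) hi hu (by omega)]
      have hmid2 : (lo + hi) / 2 = lo + (((lo + hi) / 2 - lo).toNat : Int) := by omega
      rw [← hsum, pprod_append, ← hmid2]

-- B's outer loop after m blocks equals S m
lemma outer_B (m : Nat) :
    (PySem.List.pyRange 1 ((m : Int) + 1) 1).foldl
      (fun s i =>
        let start := PySem.Int.floordiv (i * (i - 1)) 2 + 1
        s + prodRange start (start + i))
      0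
    = S m := by
  induction m with
  | zero => simp [PySem.List.pyRange_one_eq_nil, S]
  | succ m ih =>
    have h : PySem.List.pyRange 1 ((m : Int) + 1 + 1) 1
        = PySem.List.pyRange 1 ((m : Int) + 1) 1 ++ [(m : Int) + 1] :=
      PySem.List.pyRange_one_succ_right (by omega)
    push_cast
    push_cast at ih
    rw [h, List.foldl_append, ih, List.foldl_cons, List.foldl_nil]
    have hc : ((2 * tri m : Nat) : Int) = ((m * (m + 1) : Nat) : Int) := by
      exact_mod_cast congrArg (fun x : Nat => (x : Int)) (two_tri m)
    push_cast at hc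
    have hstart : PySem.Int.floordiv (((m : Int) + 1) * ((m : Int) + 1 - 1)) 2 + 1
        = (tri m : Int) + 1 := by
      have he : ((m : Int) + 1) * ((m : Int) + 1 - 1) = 2 * (tri m : Int) := by nlinarith [hc]
      rw [he]
      simp only [PySem.Int.floordiv]
      rw [Int.mul_fdiv_cancel_left _ (by norm_num)]
    rw [hstart]
    have hpr : prodRange ((tri m : Int) + 1) ((tri m : Int) + 1 + ((m : Int) + 1))
        = pprod ((tri m : Int) + 1) (m + 1) :=
      prodRange_eq (m + 1) _ _ (by push_cast; ring) (by omega)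
    rw [hpr]
    simp [S]

-- ===== VERDICT (by name: the statement is the Claim_ definition above) =====
theorem F_spec : Claim_equal_F := by
  intro n _
  unfold Spec_F
  by_cases hn : n < 1
  · unfold F F_alt
    rw [PySem.List.pyRange_one_eq_nil (by omega)]
    simp
  · have hm : n = ((n.toNat : Nat) : Int) := by omega
    have hA : F n = S n.toNat := by
      unfold F
      conv_lhs => rw [hm]
      rw [outer_A]
    have hB : F_alt n = S n.toNat := by
      unfold F_alt
      conv_lhs => rw [hm]
      rw [outer_B]
    rw [hA, hB]
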